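-- pv_equiv track=rewrite | github.com/LjubicJanko/MU-domaci | domaci_03/svm.py | remove_interpunction
-- ===== SOURCE A (Python) =====
-- const_interpunction = [',', '.', ';', '-', '?', '!', ':', '|', '_', '@', '~', '#', '^', '(', ')', '{', '}', '[', ']', '\\', '/', '+']
--
-- def find_char_occurrences(s, ch):
--     return [i for i, letter in enumerate(s) if letter == ch]
--
-- def remove_interpunction(text):
--
--     # removing signs from const_interpunction list
--     for interpunction in const_interpunction:
--         text = text.replace(interpunction, ' ')
--
--     # removing ' character
--     c = "'"
--     occurences = find_char_occurrences(text, c)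
--     for position in occurences:
--         # if ' is appearing as first or as last character in string
--         if (position == 0) or (position + 1 == len(text)):
--             text = text[:position:] + ' ' + text[position + 1::]
--         else:
--             # if somewhere around ' is an space, before or after
--             if (text[position - 1] == ' ') or (text[position + 1] == ' '):
--                 text = text[:position:] + ' ' + text[position + 1::]
--
--     return text
-- ===== SOURCE B (Python) =====
-- const_interpunction = [',', '.', ';', '-', '?', '!', ':', '|', '_', '@', '~', '#', '^', '(', ')', '{', '}', '[', ']', '\\', '/', '+']
--
-- _PUNCT = set(const_interpunction)
--
-- def remove_interpunction(text):
--     # Single left-to-right pass over the ORIGINAL text. Each char is decided once: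
--     # punctuation becomes a space; an apostrophe becomes a space when it sits at a
--     # boundary, when the char just emitted is a space (this makes the cascade through
--     # runs of apostrophes after a space come out right), or when the next original
--     # char is a space or punctuation (it will be a space in the result).
--     out = []
--     prev = None
--     chars = list(text)
--     for i, ch in enumerate(chars):
--         nxt = chars[i + 1] if i + 1 < len(chars) else None
--         if ch in _PUNCT:
--             c = ' '
--         elif ch == "'" and (prev is None or nxt is None or prev == ' '
--                             or nxt == ' ' or nxt in _PUNCT):
--             c = ' '
--         else:
--             c = ch
--         out.append(c)
--         prev = c
--     return ''.join(out)
-- ===== Notes on version B (the rewrite author's own statement) =====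
-- stated objective: alternative
-- what changed: A makes 22 whole-string replace passes and then splices a new string at every apostrophe of a precomputed occurrence list read against the mutating text; B is one left-to-right pass over the original text deciding each output character once from the character itself, the previously emitted character and the next original character (in CPython A's C-level replace passes make A the faster one, so no speed is claimed).
import Mathlib
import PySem

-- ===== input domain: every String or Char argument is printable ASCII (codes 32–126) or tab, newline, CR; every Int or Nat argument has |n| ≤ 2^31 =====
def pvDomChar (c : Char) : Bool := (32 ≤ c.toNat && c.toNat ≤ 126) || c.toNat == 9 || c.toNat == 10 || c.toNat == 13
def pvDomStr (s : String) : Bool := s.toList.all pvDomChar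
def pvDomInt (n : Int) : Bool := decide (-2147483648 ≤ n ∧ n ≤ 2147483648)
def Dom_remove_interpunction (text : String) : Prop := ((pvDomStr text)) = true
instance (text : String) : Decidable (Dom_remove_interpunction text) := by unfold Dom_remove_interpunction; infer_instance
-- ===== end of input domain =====

-- B replaces A's 22 replace passes + occurrence-list splice loop with one left-to-right pass
-- over the original text, deciding each character once from the previously emitted char and
-- the next original char (objective: alternative single-pass algorithm, no speed claim).

-- ===== PORT A =====
def const_interpunction : List String :=
  [",", ".", ";", "-", "?", "!", ":", "|", "_", "@", "~", "#", "^", "(", ")", "{", "}", "[", "]", "\\", "/", "+"]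

def find_char_occurrences (s : String) (ch : Char) : List Int :=
  ((PySem.List.enumerate s.toList 0).filter (fun p => p.2 == ch)).map (fun p => p.1)

def remove_interpunction (text : String) : String :=
  -- removing signs from const_interpunction list
  let text1 := const_interpunction.foldl (fun t interp => PySem.Str.replace t interp " ") text
  -- removing ' character
  let occurences := find_char_occurrences text1 '\''
  occurences.foldl (fun t position =>
    if position = 0 ∨ position + 1 = PySem.Str.len t then
      PySem.Str.slice t none (some position) ++ " " ++ PySem.Str.slice t (some (position + 1)) none
    else if PySem.Str.pyGet? t (position - 1) = some ' ' ∨ PySem.Str.pyGet? t (position + 1) = some ' ' then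
      PySem.Str.slice t none (some position) ++ " " ++ PySem.Str.slice t (some (position + 1)) none
    else t) text1

-- ===== PORT B =====
def pyPunct : List Char :=
  [',', '.', ';', '-', '?', '!', ':', '|', '_', '@', '~', '#', '^', '(', ')', '{', '}', '[', ']', '\\', '/', '+']

-- Source B's loop body: decide one output char from ch, the previously emitted char and
-- the next original char ('nxt in _PUNCT' is False when nxt is None).
def bHead (prev : Option Char) (ch : Char) (nxt : Option Char) : Char :=
  if ch ∈ pyPunct then ' '
  else if ch = '\'' ∧ (prev = none ∨ nxt = none ∨ prev = some ' ' ∨ nxt = some ' '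
        ∨ nxt.any (fun x => decide (x ∈ pyPunct)) = true) then ' '
  else ch

-- Source B's single for-loop over list(text): the loop state is (prev, remaining suffix);
-- 'nxt = chars[i+1] if i+1 < len(chars) else None' is the head of the remaining suffix.
def bGo : Option Char → List Char → List Char
  | _, [] => []
  | prev, ch :: rest =>
    let c := bHead prev ch rest.head?
    c :: bGo (some c) rest

def remove_interpunction_alt (text : String) : String :=
  String.ofList (bGo none text.toList)

-- ===== PRECONDITION & SPEC =====
def Spec_remove_interpunction (text : String) (out : String) : Prop := out = remove_interpunction_alt text
instance (text : String) (out : String) : Decidable (Spec_remove_interpunction text out) := by unfold Spec_remove_interpunction; infer_instance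

-- ===== CLAIM (what is proved, stated in full; the proofs are below) =====
def Claim_equal_remove_interpunction : Prop := ∀ (text : String), Dom_remove_interpunction text → Spec_remove_interpunction text (remove_interpunction text)

-- ===== LEMMAS AND PROOFS =====

lemma go_single (p : Char) : ∀ (l : List Char) (fuel : Nat) (acc : List Char), l.length ≤ fuel →
    PySem.Chars.replace.go [p] [' '] fuel l acc
    = acc.reverse ++ l.map (fun c => if c = p then ' ' else c) := by
  intro l
  induction l with
  | nil =>
    intro fuel acc _
    cases fuel <;> simp [PySem.Chars.replace.go]
  | cons c t ih =>
    intro fuel acc h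
    cases fuel with
    | zero => simp at h
    | succ f =>
      rw [PySem.Chars.replace.go]
      have hf : t.length ≤ f := by simpa using h
      by_cases hc : c = p
      · subst hc
        have hpre : [c].isPrefixOf (c :: t) = true := by simp [List.isPrefixOf]
        simp only [hpre, if_pos, List.length_cons, List.length_nil, List.drop_succ_cons,
          List.drop_zero, List.reverse_cons, List.reverse_nil, List.nil_append]
        rw [List.singleton_append, ih f (_ :: acc) hf]
        simp
      · have hpre : [p].isPrefixOf (c :: t) = false := by
          simp [List.isPrefixOf]; intro h'; exact (hc h'.symm).elim
        simp only [hpre, Bool.false_eq_true, if_false]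
        rw [ih f (c :: acc) hf]
        simp [hc]

lemma replace_single (p : Char) (l : List Char) :
    PySem.Chars.replace l [p] [' '] = l.map (fun c => if c = p then ' ' else c) := by
  rw [PySem.Chars.replace]
  simp only [List.isEmpty_cons, Bool.false_eq_true, if_false]
  simpa using go_single p l l.length [] le_rfl

lemma fold_replace_map : ∀ (ps : List Char) (l : List Char),
    ps.foldl (fun t p => PySem.Chars.replace t [p] [' ']) l
    = l.map (fun c => if c ∈ ps then ' ' else c) := by
  intro ps
  induction ps with
  | nil => intro l; simp
  | cons p ps ih =>
    intro l
    rw [List.foldl_cons, replace_single, ih, List.map_map]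
    apply List.map_congr_left
    intro c _
    by_cases hc : c = p <;> by_cases hm : c ∈ ps <;> simp [hc, hm]

lemma const_fold (l : List Char) :
    const_interpunction.foldl (fun t p => PySem.Chars.replace t p.toList [' ']) l
    = pyPunct.foldl (fun t c => PySem.Chars.replace t [c] [' ']) l := rfl

lemma foldl_replace_toList : ∀ (ss : List String) (t : String),
    (ss.foldl (fun t p => PySem.Str.replace t p " ") t).toList
    = ss.foldl (fun l p => PySem.Chars.replace l p.toList [' ']) t.toList := by
  intro ss
  induction ss with
  | nil => intro t; rfl
  | cons s ss ih => intro t; simp [List.foldl, ih, PySem.Str.toList_replace]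

-- list-level mirror of A's splice step (apostrophe loop body)
def stepA (t : List Char) (position : Int) : List Char :=
  if position = 0 ∨ position + 1 = PySem.List.len t then
    PySem.List.slice t none (some position) ++ [' '] ++ PySem.List.slice t (some (position + 1)) none
  else if PySem.List.pyGet? t (position - 1) = some ' ' ∨ PySem.List.pyGet? t (position + 1) = some ' ' then
    PySem.List.slice t none (some position) ++ [' '] ++ PySem.List.slice t (some (position + 1)) none
  else t

lemma space_toList : (" " : String).toList = [' '] := rfl

lemma step_toList (t : String) (position : Int) :
    ((if position = 0 ∨ position + 1 = PySem.Str.len t then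
        PySem.Str.slice t none (some position) ++ " " ++ PySem.Str.slice t (some (position + 1)) none
      else if PySem.Str.pyGet? t (position - 1) = some ' ' ∨ PySem.Str.pyGet? t (position + 1) = some ' ' then
        PySem.Str.slice t none (some position) ++ " " ++ PySem.Str.slice t (some (position + 1)) none
      else t) : String).toList = stepA t.toList position := by
  rw [stepA]
  have hlen : PySem.Str.len t = PySem.List.len t.toList := by
    simp [PySem.Str.len_eq, PySem.List.len_eq]
  have hget : ∀ i, PySem.Str.pyGet? t i = PySem.List.pyGet? t.toList i := by
    intro i; simp [PySem.Str.pyGet?_eq, PySem.Chars.pyGet?_eq_listPyGet?]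
  rw [hlen, hget, hget]
  split_ifs <;>
    simp [String.toList_append, PySem.Str.toList_slice, PySem.Chars.slice_eq_listSlice, space_toList]

lemma foldl_step_toList (occ : List Int) : ∀ (t : String),
    (occ.foldl (fun t position =>
      if position = 0 ∨ position + 1 = PySem.Str.len t then
        PySem.Str.slice t none (some position) ++ " " ++ PySem.Str.slice t (some (position + 1)) none
      else if PySem.Str.pyGet? t (position - 1) = some ' ' ∨ PySem.Str.pyGet? t (position + 1) = some ' ' then
        PySem.Str.slice t none (some position) ++ " " ++ PySem.Str.slice t (some (position + 1)) none
      else t) t).toList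
    = occ.foldl stepA t.toList := by
  induction occ with
  | nil => intro t; rfl
  | cons p ps ih =>
    intro t
    rw [List.foldl_cons, List.foldl_cons, ih, step_toList]

-- B's loop body at list level, with getD/setD (n fixed, the initial length)
def patchStep (n : Int) (chars : List Char) (i : Int) : List Char :=
  if i = 0 ∨ i + 1 = n ∨ PySem.List.pyGetD chars (i - 1) ' ' = ' ' ∨ PySem.List.pyGetD chars (i + 1) ' ' = ' '
  then PySem.List.pySetD chars i ' ' else chars

-- the apostrophe positions of t that are ≥ k, in increasing order
def occFrom (t : List Char) (k : Nat) : List Int :=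
  ((PySem.List.enumerate (t.drop k) (k : Int)).filter (fun p => p.2 == '\'')).map (fun p => p.1)

lemma filter_enumerate_nil (v : List Char) (s : Int) (h : '\'' ∉ v) :
    (PySem.List.enumerate v s).filter (fun p => p.2 == '\'') = [] := by
  apply List.filter_eq_nil_iff.mpr
  intro p hp
  obtain ⟨k, hk, rfl⟩ := (PySem.List.mem_enumerate_iff v s p).mp hp
  simp only [beq_iff_eq]
  intro hc
  exact h (hc ▸ List.getElem_mem hk)

lemma occFrom_nil (t : List Char) (k : Nat) (h : '\'' ∉ t.drop k) : occFrom t k = [] := by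
  rw [occFrom, filter_enumerate_nil _ _ h, List.map_nil]

lemma occFrom_step (t : List Char) (k : Nat) (hk : k < t.length) :
    occFrom t k = (if t[k] = '\'' then [((k : Nat) : Int)] else []) ++ occFrom t (k + 1) := by
  have hd : t.drop k = t[k] :: t.drop (k + 1) := List.drop_eq_getElem_cons hk
  rw [occFrom, hd, PySem.List.enumerate_cons, List.filter_cons]
  by_cases hc : t[k] = '\''
  · simp [hc, occFrom, Nat.cast_add]
  · simp [hc, occFrom, Nat.cast_add]

-- on an in-range position, A's slice-splice is exactly the getD/setD patch
lemma patch_eq_stepA (chars : List Char) (i : Int) (hi : 0 ≤ i) (hlt : i < (chars.length : Int)) :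
    patchStep (chars.length : Int) chars i = stepA chars i := by
  obtain ⟨m, rfl⟩ := Int.eq_ofNat_of_zero_le hi
  have hm : m < chars.length := by exact_mod_cast hlt
  rw [patchStep, stepA]
  have hsplice :
      PySem.List.slice chars none (some (m : Int)) ++ [' ']
        ++ PySem.List.slice chars (some ((m : Int) + 1)) none
      = PySem.List.pySetD chars (m : Int) ' ' := by
    rw [PySem.List.slice_to_natCast,
      show ((m : Int) + 1) = ((m + 1 : Nat) : Int) by push_cast; ring,
      PySem.List.slice_from_natCast, PySem.List.pySetD_natCast,
      List.set_eq_take_cons_drop ' ' hm]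
    simp
  by_cases h0 : (m : Int) = 0 ∨ (m : Int) + 1 = PySem.List.len chars
  · have h0' : (m : Int) = 0 ∨ (m : Int) + 1 = (chars.length : Int)
        ∨ PySem.List.pyGetD chars ((m : Int) - 1) ' ' = ' '
        ∨ PySem.List.pyGetD chars ((m : Int) + 1) ' ' = ' ' := by
      rcases h0 with h | h
      · exact Or.inl h
      · exact Or.inr (Or.inl (by simpa [PySem.List.len_eq] using h))
    rw [if_pos h0', if_pos h0, hsplice]
  · have hm0 : m ≠ 0 := by intro h; exact h0 (Or.inl (by exact_mod_cast h))
    have hm1 : m + 1 < chars.length := by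
      rcases Nat.lt_or_ge (m + 1) chars.length with h | h
      · exact h
      · exact absurd (Or.inr (by simp [PySem.List.len_eq]; omega)) h0
    have hprev : PySem.List.pyGetD chars ((m : Int) - 1) ' ' = chars[m - 1] := by
      rw [show ((m : Int) - 1) = ((m - 1 : Nat) : Int) by push_cast [Nat.cast_sub (Nat.one_le_iff_ne_zero.mpr hm0)]; ring]
      rw [PySem.List.pyGetD_natCast, List.getD_eq_getElem _ _ (by omega)]
    have hnext : PySem.List.pyGetD chars ((m : Int) + 1) ' ' = chars[m + 1] := by
      rw [show ((m : Int) + 1) = ((m + 1 : Nat) : Int) by push_cast; ring]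
      rw [PySem.List.pyGetD_natCast, List.getD_eq_getElem _ _ hm1]
    have hprev? : PySem.List.pyGet? chars ((m : Int) - 1) = some chars[m - 1] := by
      rw [show ((m : Int) - 1) = ((m - 1 : Nat) : Int) by push_cast [Nat.cast_sub (Nat.one_le_iff_ne_zero.mpr hm0)]; ring]
      rw [PySem.List.pyGet?_natCast, List.getElem?_eq_getElem (by omega)]
    have hnext? : PySem.List.pyGet? chars ((m : Int) + 1) = some chars[m + 1] := by
      rw [show ((m : Int) + 1) = ((m + 1 : Nat) : Int) by push_cast; ring]
      rw [PySem.List.pyGet?_natCast, List.getElem?_eq_getElem hm1]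
    rw [if_neg h0, hprev, hnext, hprev?, hnext?]
    by_cases hsp : chars[m - 1] = ' ' ∨ chars[m + 1] = ' '
    · have hl : (m : Int) = 0 ∨ (m : Int) + 1 = (chars.length : Int)
          ∨ chars[m - 1] = ' ' ∨ chars[m + 1] = ' ' := Or.inr (Or.inr hsp)
      have hr : some chars[m - 1] = some ' ' ∨ some chars[m + 1] = some ' ' := by
        rcases hsp with h | h
        · exact Or.inl (by rw [h])
        · exact Or.inr (by rw [h])
      rw [if_pos hl, if_pos hr, hsplice]
    · have hl : ¬ ((m : Int) = 0 ∨ (m : Int) + 1 = (chars.length : Int)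
          ∨ chars[m - 1] = ' ' ∨ chars[m + 1] = ' ') := by
        push Not
        refine ⟨by exact_mod_cast hm0, by simp [PySem.List.len_eq] at h0; omega, ?_, ?_⟩
        · exact fun h => hsp (Or.inl h)
        · exact fun h => hsp (Or.inr h)
      have hr : ¬ (some chars[m - 1] = some ' ' ∨ some chars[m + 1] = some ' ') := by
        intro h
        rcases h with h | h
        · exact hsp (Or.inl (Option.some.inj h))
        · exact hsp (Or.inr (Option.some.inj h))
      rw [if_neg hl, if_neg hr]

-- B's pass, specialised to an already punctuation-translated list
def gHead (prev : Option Char) (c : Char) (nxt : Option Char) : Char :=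
  if c = '\'' ∧ (prev = none ∨ prev = some ' ' ∨ nxt = none ∨ nxt = some ' ')
  then ' ' else c

def goT : Option Char → List Char → List Char
  | _, [] => []
  | prev, c :: rest =>
    let c' := gHead prev c rest.head?
    c' :: goT (some c') rest

-- heads agree pointwise through the punctuation translation
lemma bHead_eq_gHead (prev : Option Char) (ch : Char) (nxt : Option Char) :
    bHead prev ch nxt
    = gHead prev (if ch ∈ pyPunct then ' ' else ch) (nxt.map (fun c => if c ∈ pyPunct then ' ' else c)) := by
  rw [bHead, gHead]
  by_cases hp : ch ∈ pyPunct
  · have h1 : ¬ ((if ch ∈ pyPunct then ' ' else ch) = '\'' ∧ (prev = none ∨ prev = some ' '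
        ∨ nxt.map (fun c => if c ∈ pyPunct then ' ' else c) = none
        ∨ nxt.map (fun c => if c ∈ pyPunct then ' ' else c) = some ' ')) := by
      rw [if_pos hp]; rintro ⟨h, -⟩; exact absurd h (by decide)
    rw [if_pos hp, if_neg h1, if_pos hp]
  · rw [if_neg hp]
    by_cases ha : ch = '\''
    · subst ha
      have hfc : (if ('\'' : Char) ∈ pyPunct then ' ' else '\'') = '\'' := if_neg hp
      have hiff : (prev = none ∨ nxt = none ∨ prev = some ' ' ∨ nxt = some ' '
            ∨ nxt.any (fun x => decide (x ∈ pyPunct)) = true)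
          ↔ (prev = none ∨ prev = some ' '
            ∨ nxt.map (fun c => if c ∈ pyPunct then ' ' else c) = none
            ∨ nxt.map (fun c => if c ∈ pyPunct then ' ' else c) = some ' ') := by
        cases nxt with
        | none => simp
        | some y =>
          by_cases hy : y ∈ pyPunct
          · simp [hy]
          · simp [hy]; try tauto
      by_cases hP : prev = none ∨ nxt = none ∨ prev = some ' ' ∨ nxt = some ' '
          ∨ nxt.any (fun x => decide (x ∈ pyPunct)) = true
      · rw [if_pos ⟨rfl, hP⟩, if_pos ⟨hfc, hiff.mp hP⟩]
      · rw [if_neg (by rintro ⟨-, h⟩; exact hP h),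
          if_neg (by rintro ⟨-, h⟩; exact hP (hiff.mpr h)), hfc]
    · have h1 : ¬ (ch = '\'' ∧ (prev = none ∨ nxt = none ∨ prev = some ' ' ∨ nxt = some ' '
          ∨ nxt.any (fun x => decide (x ∈ pyPunct)) = true)) := by
        rintro ⟨h, -⟩; exact ha h
      have h2 : ¬ ((if ch ∈ pyPunct then ' ' else ch) = '\'' ∧ (prev = none ∨ prev = some ' '
          ∨ nxt.map (fun c => if c ∈ pyPunct then ' ' else c) = none
          ∨ nxt.map (fun c => if c ∈ pyPunct then ' ' else c) = some ' ')) := by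
        rw [if_neg hp]; rintro ⟨h, -⟩; exact ha h
      rw [if_neg h1, if_neg h2, if_neg hp]

-- bridge: Source B's pass over the original list = goT over the translated list
lemma bGo_eq_goT : ∀ (l : List Char) (prev : Option Char),
    bGo prev l = goT prev (l.map (fun c => if c ∈ pyPunct then ' ' else c)) := by
  intro l
  induction l with
  | nil => intro prev; rfl
  | cons ch rest ih =>
    intro prev
    rw [bGo, List.map_cons, goT]
    have hh : bHead prev ch rest.head?
        = gHead prev (if ch ∈ pyPunct then ' ' else ch)
            ((rest.map (fun c => if c ∈ pyPunct then ' ' else c)).head?) := by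
      rw [List.head?_map]; exact bHead_eq_gHead prev ch rest.head?
    rw [hh, ih]

-- the char A's loop reads as "previous" when it reaches position k
def prevOpt (chars : List Char) (k : Nat) : Option Char :=
  if k = 0 then none else chars[k - 1]?

-- MAIN INVARIANT: A's remaining splices from position k onward finish the string exactly
-- as B's single pass finishes the (translated) suffix from k.
lemma main_inv (t : List Char) : ∀ (n k : Nat) (chars : List Char), k ≤ t.length →
    t.length - k = n → chars.length = t.length → chars.drop k = t.drop k →
    (occFrom t k).foldl stepA chars = chars.take k ++ goT (prevOpt chars k) (t.drop k) := by
  intro n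
  induction n with
  | zero =>
    intro k chars hk hn hlen hdrop
    have hk' : k = t.length := by omega
    subst hk'
    have hd : t.drop t.length = [] := by simp
    rw [occFrom_nil t t.length (by simp [hd]), List.foldl_nil, hd,
      show goT (prevOpt chars t.length) [] = [] from rfl, List.append_nil]
    exact (List.take_of_length_le (le_of_eq hlen)).symm
  | succ n ih =>
    intro k chars hk hn hlen hdrop
    have hklt : k < t.length := by omega
    have hck : chars[k]? = t[k]? := by
      have := congrArg (fun l => l.head?) hdrop
      simpa [List.head?_drop] using this
    have hckv : chars[k]'(by omega) = t[k] := by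
      have h1 : chars[k]? = some (chars[k]'(by omega)) := List.getElem?_eq_getElem (by omega)
      have h2 : t[k]? = some t[k] := List.getElem?_eq_getElem hklt
      rw [h1, h2] at hck
      exact Option.some.inj hck
    have hdropsucc : chars.drop (k + 1) = t.drop (k + 1) := by
      have := congrArg List.tail hdrop
      simpa [List.tail_drop] using this
    have hdropc : t.drop k = t[k] :: t.drop (k + 1) := List.drop_eq_getElem_cons hklt
    have htake : chars.take (k + 1) = chars.take k ++ [t[k]] := by
      rw [List.take_add_one, List.getElem?_eq_getElem (show k < chars.length by omega)]
      simp [hckv]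
    rw [occFrom_step t k hklt]
    by_cases hap : t[k] = '\''
    · -- apostrophe at k: A splices here (or not), B emits ' ' (or ')
      rw [if_pos hap, List.singleton_append, List.foldl_cons]
      have hstep : stepA chars ((k : Nat) : Int) = patchStep (chars.length : Int) chars k :=
        (patch_eq_stepA chars k (by positivity) (by exact_mod_cast (by omega : k < chars.length))).symm
      rw [hstep, patchStep]
      -- the two conditions agree
      have hrest : (t.drop (k + 1)).head? = none ↔ k + 1 = t.length := by
        rw [List.head?_eq_none_iff]
        constructor
        · intro h; have := congrArg List.length h; simp at this; omega
        · intro h; exact List.drop_eq_nil_of_le (by omega)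
      have hcond : ((k : Int) = 0 ∨ (k : Int) + 1 = (chars.length : Int)
            ∨ PySem.List.pyGetD chars ((k : Int) - 1) ' ' = ' '
            ∨ PySem.List.pyGetD chars ((k : Int) + 1) ' ' = ' ')
          ↔ (prevOpt chars k = none ∨ prevOpt chars k = some ' '
            ∨ (t.drop (k + 1)).head? = none ∨ (t.drop (k + 1)).head? = some ' ') := by
        by_cases hk0 : k = 0
        · subst hk0; simp [prevOpt]
        · by_cases hk1 : k + 1 = t.length
          · constructor
            · intro _
              exact Or.inr (Or.inr (Or.inl (hrest.mpr hk1)))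
            · intro _
              refine Or.inr (Or.inl ?_)
              rw [hlen]; exact_mod_cast congrArg (Nat.cast : Nat → Int) hk1
          · have hprevOpt : prevOpt chars k = some (chars[k-1]'(by omega)) := by
              rw [prevOpt, if_neg hk0, List.getElem?_eq_getElem (by omega)]
            have hgd1 : PySem.List.pyGetD chars ((k : Int) - 1) ' ' = chars[k-1]'(by omega) := by
              rw [show ((k : Int) - 1) = ((k - 1 : Nat) : Int) by omega,
                PySem.List.pyGetD_natCast, List.getD_eq_getElem _ _ (by omega)]
            have hck1 : chars[k+1]'(by omega) = t[k+1]'(by omega) := by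
              have h1 := congrArg (fun l => l.head?) hdropsucc
              simp only [List.head?_drop] at h1
              rw [List.getElem?_eq_getElem (show k+1 < chars.length by omega),
                List.getElem?_eq_getElem (show k+1 < t.length by omega)] at h1
              exact Option.some.inj h1
            have hgd2 : PySem.List.pyGetD chars ((k : Int) + 1) ' ' = t[k+1]'(by omega) := by
              rw [show ((k : Int) + 1) = ((k + 1 : Nat) : Int) by omega,
                PySem.List.pyGetD_natCast, List.getD_eq_getElem _ _ (by omega), hck1]
            have hhead : (t.drop (k + 1)).head? = some (t[k+1]'(by omega)) := by
              rw [List.head?_drop, List.getElem?_eq_getElem (by omega)]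
            constructor
            · rintro (h | h | h | h)
              · exact absurd (by exact_mod_cast h) hk0
              · exfalso; rw [hlen] at h; exact hk1 (by exact_mod_cast h)
              · rw [hgd1] at h; exact Or.inr (Or.inl (by rw [hprevOpt, h]))
              · rw [hgd2] at h
                exact Or.inr (Or.inr (Or.inr (by rw [hhead, h])))
            · rintro (h | h | h | h)
              · rw [hprevOpt] at h; exact absurd h (by simp)
              · rw [hprevOpt] at h
                exact Or.inr (Or.inr (Or.inl (by rw [hgd1]; exact Option.some.inj h)))
              · exact absurd (hrest.mp h) hk1
              · rw [hhead] at h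
                exact Or.inr (Or.inr (Or.inr (by rw [hgd2]; exact Option.some.inj h)))
      rw [hdropc, goT]
      simp only [gHead, hap, true_and]
      by_cases hc : prevOpt chars k = none ∨ prevOpt chars k = some ' '
          ∨ (t.drop (k + 1)).head? = none ∨ (t.drop (k + 1)).head? = some ' '
      · rw [if_pos (hcond.mpr hc), if_pos hc]
        have hset : PySem.List.pySetD chars ((k : Nat) : Int) ' ' = chars.set k ' ' :=
          PySem.List.pySetD_natCast ..
        rw [hset]
        have ihs := ih (k + 1) (chars.set k ' ') (by omega) (by omega)
          (by simpa using hlen) (by rw [List.drop_set_of_lt (by omega)]; exact hdropsucc)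
        rw [ihs]
        have h1 : (chars.set k ' ').take (k + 1) = chars.take k ++ [' '] := by
          rw [List.take_add_one, List.getElem?_set_self (by simpa using (by omega : k < chars.length))]
          simp [List.take_set_of_le (le_refl k)]
        have h2 : prevOpt (chars.set k ' ') (k + 1) = some ' ' := by
          rw [prevOpt, if_neg (by omega)]
          simpa using List.getElem?_set_self (l := chars) (i := k) (a := ' ') (by omega)
        rw [h1, h2]
        simp
      · rw [if_neg (fun h => hc (hcond.mp h)), if_neg hc]
        have ihs := ih (k + 1) chars (by omega) (by omega) hlen hdropsucc
        rw [ihs, htake]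
        have h2 : prevOpt chars (k + 1) = some '\'' := by
          rw [prevOpt, if_neg (by omega)]
          simp [List.getElem?_eq_getElem (show k < chars.length by omega), hckv, hap]
        rw [h2, hap]
        simp
    · -- ordinary char at k: A does nothing here, B copies it
      rw [if_neg hap, List.nil_append]
      have ihs := ih (k + 1) chars (by omega) (by omega) hlen hdropsucc
      rw [ihs, htake, hdropc, goT]
      have hcond : ¬ (t[k] = '\'' ∧ (prevOpt chars k = none ∨ prevOpt chars k = some ' '
          ∨ (t.drop (k + 1)).head? = none ∨ (t.drop (k + 1)).head? = some ' ')) := by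
        rintro ⟨h, -⟩; exact hap h
      simp only [gHead, hcond]
      have h2 : prevOpt chars (k + 1) = some t[k] := by
        rw [prevOpt, if_neg (by omega)]
        simp [List.getElem?_eq_getElem (show k < chars.length by omega), hckv]
      rw [h2]
      simp

-- ===== VERDICT (by name: the statement is the Claim_ definition above) =====
set_option maxRecDepth 4000 in
theorem remove_interpunction_spec : Claim_equal_remove_interpunction := by
  intro text _
  unfold Spec_remove_interpunction
  rw [← String.toList_inj]
  simp only [remove_interpunction, remove_interpunction_alt, find_char_occurrences]
  rw [foldl_step_toList]
  have ht1 : (const_interpunction.foldl (fun t interp => PySem.Str.replace t interp " ") text).toList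
      = text.toList.map (fun c => if c ∈ pyPunct then ' ' else c) := by
    rw [foldl_replace_toList, const_fold, fold_replace_map]
  rw [ht1]
  set t : List Char := text.toList.map (fun c => if c ∈ pyPunct then ' ' else c) with hdef
  have hocc0 : ((PySem.List.enumerate t 0).filter (fun p => p.2 == '\'')).map (fun p => p.1)
      = occFrom t 0 := by
    rw [occFrom, List.drop_zero, Nat.cast_zero]
  rw [hocc0, main_inv t (t.length) 0 t (Nat.zero_le _) (Nat.sub_zero _) rfl rfl]
  have hofList : (String.ofList (bGo none text.toList)).toList = bGo none text.toList := by simp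
  rw [hofList, bGo_eq_goT, ← hdef, List.take_zero, List.drop_zero, List.nil_append]
  have hp0 : prevOpt t 0 = none := rfl
  rw [hp0]
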